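-- pv_equiv track=rewrite | github.com/JohannesAllwang/jolymer | src/jolymer/sas/SAXS_Model.py | combine_fitresults
-- ===== SOURCE A (Python) =====
-- def combine_fitresults(fitdicts):
--     out = {}
--     for fitdict in fitdicts:
--         for key in fitdict:
--             if key in out:
--                 out[key].append(fitdict[key])
--             else:
--                 out[key] = [fitdict[key]]
--     return out
-- ===== SOURCE B (Python) =====
-- def combine_fitresults(fitdicts):
--     keys = dict.fromkeys(k for d in fitdicts for k in d)
--     return {key: [d[key] for d in fitdicts if key in d] for key in keys}
-- ===== Notes on version B (the rewrite author's own statement) =====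
-- stated objective: alternative
-- what changed: Replaces A's single append-or-create grouping pass with a two-phase strategy: first gather the distinct keys in first-appearance order, then build each key's value list by one comprehension over all dicts.
import Mathlib
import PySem

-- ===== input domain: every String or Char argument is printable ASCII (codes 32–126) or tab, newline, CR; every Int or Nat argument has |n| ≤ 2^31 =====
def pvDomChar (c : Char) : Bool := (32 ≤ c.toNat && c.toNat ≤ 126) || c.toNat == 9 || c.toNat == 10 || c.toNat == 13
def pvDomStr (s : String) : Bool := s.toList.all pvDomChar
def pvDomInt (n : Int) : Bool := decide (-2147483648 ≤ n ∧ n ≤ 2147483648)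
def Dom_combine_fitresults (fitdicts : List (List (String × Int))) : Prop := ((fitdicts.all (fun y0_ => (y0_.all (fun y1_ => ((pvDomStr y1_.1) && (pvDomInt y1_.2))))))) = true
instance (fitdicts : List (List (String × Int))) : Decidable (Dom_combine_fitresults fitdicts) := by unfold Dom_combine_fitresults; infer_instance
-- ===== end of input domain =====

-- B is an alternative decomposition (gather distinct keys first, then regroup per key); same return value.
-- ===== PORT A =====
-- out = {}; for fitdict in fitdicts: for key in fitdict: append-or-create out[key]; return out
-- (each inner assoc list denotes the Python dict built from it: PySem.Dict.ofList; the
--  append-or-create branch is exactly Dict.modify key [] (· ++ [v]))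
def combine_fitresults (fitdicts : List (List (String × Int))) : List (String × List Int) :=
  (fitdicts.foldl
    (fun out fitdict =>
      (PySem.Dict.ofList fitdict).items.foldl
        (fun out p => out.modify p.1 [] (fun l => l ++ [p.2])) out)
    PySem.Dict.empty).items

-- ===== PORT B =====
-- keys = dict.fromkeys(k for d in fitdicts for k in d)
-- return {key: [d[key] for d in fitdicts if key in d] for key in keys}
def combine_fitresults_alt (fitdicts : List (List (String × Int))) : List (String × List Int) :=
  let ds := fitdicts.map (fun f => PySem.Dict.ofList f)
  let keys := PySem.List.dedup (ds.flatMap (fun d => d.keys))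
  keys.map (fun k => (k, ds.filterMap (fun d => d.get? k)))

-- ===== PRECONDITION & SPEC =====
def Spec_combine_fitresults (fitdicts : List (List (String × Int))) (out : List (String × List Int)) : Prop := out = combine_fitresults_alt fitdicts
instance (fitdicts : List (List (String × Int))) (out : List (String × List Int)) : Decidable (Spec_combine_fitresults fitdicts out) := by unfold Spec_combine_fitresults; infer_instance

-- ===== CLAIM (what is proved, stated in full; the proofs are below) =====
def Claim_equal_combine_fitresults : Prop := ∀ (fitdicts : List (List (String × Int))), Dom_combine_fitresults fitdicts → Spec_combine_fitresults fitdicts (combine_fitresults fitdicts)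

-- ===== LEMMAS AND PROOFS =====

theorem keyfilter_nil {ν : Type} (k : String) (l : List (String × ν))
    (h : k ∉ l.map (·.1)) : l.filter (fun p => p.1 == k) = [] := by
  rw [List.filter_eq_nil_iff]
  intro p hp
  simp only [beq_iff_eq]
  intro hpk
  exact h (hpk ▸ List.mem_map_of_mem hp)

-- In a dict with nodup keys, filtering the items at key k and taking values is (get? k).toList.
theorem filter_items_get? {ν : Type} (d : PySem.Dict String ν) (hnd : d.keys.Nodup) (k : String) :
    (d.items.filter (fun p => p.1 == k)).map (·.2) = (d.get? k).toList := by
  obtain ⟨l⟩ := d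
  simp only [PySem.Dict.keys] at hnd
  induction l with
  | nil => rfl
  | cons a l ih =>
    simp only [List.map_cons, List.nodup_cons] at hnd
    rw [PySem.Dict.get?_mk_cons]
    by_cases hk : a.1 = k
    · subst hk
      simp only [List.filter_cons, BEq.rfl]
      rw [keyfilter_nil _ _ hnd.1]
      rfl
    · have hne : (a.1 == k) = false := by simp [hk]
      simp only [List.filter_cons, hne, Bool.false_eq_true, if_false]
      exact ih hnd.2

theorem foldl_flatMap' {α β σ : Type} (g : σ → β → σ) (f : α → List β) (l : List α) (init : σ) :
    (l.flatMap f).foldl g init = l.foldl (fun acc x => (f x).foldl g acc) init := by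
  induction l generalizing init with
  | nil => rfl
  | cons a l ih => simp [List.foldl_append, ih]

-- A's nested loop, flattened.
theorem portA_flatten (fitdicts : List (List (String × Int))) :
    combine_fitresults fitdicts =
      ((fitdicts.flatMap (fun f => (PySem.Dict.ofList f).items)).foldl
        (fun out p => out.modify p.1 [] (fun l => l ++ [p.2])) PySem.Dict.empty).items := by
  unfold combine_fitresults
  rw [foldl_flatMap']

theorem filterMap_eq_flatMap_toList {α β : Type} (f : α → Option β) (l : List α) :
    l.filterMap f = l.flatMap (fun a => (f a).toList) := by
  induction l with
  | nil => rfl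
  | cons a l ih => cases h : f a <;> simp [h, ih]

-- ===== VERDICT (by name: the statement is the Claim_ definition above) =====
theorem combine_fitresults_spec : Claim_equal_combine_fitresults := by
  intro fitdicts _
  unfold Spec_combine_fitresults combine_fitresults_alt
  rw [portA_flatten]
  set pairs := fitdicts.flatMap (fun f => (PySem.Dict.ofList f).items) with hpairs
  have hnd : ((pairs.foldl (fun out p => out.modify p.1 [] (fun l => l ++ [p.2]))
      PySem.Dict.empty).keys).Nodup := by
    exact PySem.Dict.nodup_keys_foldl_modify_key pairs Prod.fst [] _ _ PySem.Dict.nodup_keys_empty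
  rw [PySem.Dict.items_eq_map_keys _ hnd ([] : List Int)]
  have hkeys : (pairs.foldl (fun out p => out.modify p.1 [] (fun l => l ++ [p.2]))
      PySem.Dict.empty).keys = PySem.Set.ofList (pairs.map (·.1)) := by
    rw [PySem.Dict.keys_foldl_modify_key]
    simp [PySem.Dict.keys_empty, PySem.Set.update_nil_left]
  rw [hkeys]
  have hkeysB : (fitdicts.map (fun f => PySem.Dict.ofList f)).flatMap (fun d => d.keys)
      = pairs.map (·.1) := by
    simp [hpairs, PySem.Dict.keys, List.map_flatMap, List.flatMap_map]
  simp only []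
  rw [hkeysB]
  simp only [PySem.List.dedup_eq_ofList]
  apply List.map_congr_left
  intro k hk
  congr 1
  rw [filterMap_eq_flatMap_toList]
  have : ∀ f : List (String × Int),
      ((PySem.Dict.ofList f).get? k).toList
        = ((PySem.Dict.ofList f).items.filter (fun p => p.1 == k)).map (·.2) := by
    intro f
    rw [filter_items_get? _ (PySem.Dict.nodup_keys_ofList f)]
  simp only [List.flatMap_map, this]
  rw [PySem.Dict.getD_foldl_modify_append]
  simp [hpairs, List.filter_flatMap, List.map_flatMap]
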